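-- pv_equiv track=rewrite | github.com/0langa/DevDocsDownloader | doc_ingest/sources/registry.py | _version_digits
-- ===== SOURCE A (Python) =====
-- def _version_digits(version: str) -> set[str]:
--     digits = [chunk for chunk in ("".join(ch for ch in part if ch.isdigit()) for part in version.split(".")) if chunk]
--     if not digits:
--         return set()
--     out = {"".join(digits)}
--     if digits[0]:
--         out.add(digits[0])
--     return out
-- ===== SOURCE B (Python) =====
-- def _version_digits(version: str) -> set[str]:
--     all_digits = []
--     first = []
--     first_done = False
--     for ch in version:
--         if ch == ".":
--             if first:
--                 first_done = True
--         elif ch.isdigit():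
--             all_digits.append(ch)
--             if not first_done:
--                 first.append(ch)
--     if not all_digits:
--         return set()
--     out = {"".join(all_digits)}
--     if first:
--         out.add("".join(first))
--     return out
-- ===== Notes on version B (the rewrite author's own statement) =====
-- stated objective: alternative
-- what changed: B replaces split/comprehension/join with a single-pass character state machine that accumulates all digits and the first digit-bearing chunk (frozen by a '.' after a digit) in one traversal, never building the per-part chunk list.
import Mathlib
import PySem

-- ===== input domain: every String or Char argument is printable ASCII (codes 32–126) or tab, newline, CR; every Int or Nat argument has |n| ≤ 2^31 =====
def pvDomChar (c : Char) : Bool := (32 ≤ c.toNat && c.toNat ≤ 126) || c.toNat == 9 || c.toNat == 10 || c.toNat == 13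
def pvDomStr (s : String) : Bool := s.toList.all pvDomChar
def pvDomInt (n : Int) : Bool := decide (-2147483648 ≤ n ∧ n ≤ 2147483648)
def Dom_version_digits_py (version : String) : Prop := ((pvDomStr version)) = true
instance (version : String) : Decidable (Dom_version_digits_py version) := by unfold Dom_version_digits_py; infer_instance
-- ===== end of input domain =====

-- B replaces split/join with a single-pass character state machine (one traversal,
-- no per-part chunk list); same return value, stated as an alternative decomposition.


-- ===== PORT A =====
-- digits = [chunk for chunk in ("".join(ch for ch in part if ch.isdigit()) for part in version.split(".")) if chunk]
-- ("".join over single chars is ported as String.ofList of the filtered char list — exact)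
def version_digits_py (version : String) : List String :=
  let digits : List String :=
    (((PySem.Chars.splitOn version.toList ['.']).map String.ofList).map
      (fun part => String.ofList (part.toList.filter PySem.Chars.isdigit))).filter (fun c => c ≠ "")
  if digits = [] then PySem.Set.empty
  else
    let out : PySem.Set String := PySem.Set.ofList [PySem.Str.join "" digits]
    if digits.headD "" ≠ "" then PySem.Set.add out (digits.headD "") else out

-- ===== PORT B =====
-- the for-loop of Source B: tail recursion over the characters carrying the loop state
-- (all_digits, first, first_done); branch order as in Python's if/elif
def scanB (a f : List Char) (d : Bool) : List Char → List Char × List Char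
  | [] => (a, f)
  | c :: rest =>
    if c = '.' then scanB a (f) (d || f ≠ []) rest
    else if PySem.Chars.isdigit c then
      scanB (a ++ [c]) (if d then f else f ++ [c]) d rest
    else scanB a f d rest

def version_digits_py_alt (version : String) : List String :=
  let st := scanB [] [] false version.toList
  if st.1 = [] then PySem.Set.empty
  else
    let out : PySem.Set String := PySem.Set.ofList [String.ofList st.1]
    if st.2 ≠ [] then PySem.Set.add out (String.ofList st.2) else out

-- ===== PRECONDITION & SPEC =====
def Spec_version_digits_py (version : String) (out : List String) : Prop := out = version_digits_py_alt version
instance (version : String) (out : List String) : Decidable (Spec_version_digits_py version out) := by unfold Spec_version_digits_py; infer_instance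

-- ===== CLAIM (what is proved, stated in full; the proofs are below) =====
def Claim_equal_version_digits_py : Prop := ∀ (version : String), Dom_version_digits_py version → Spec_version_digits_py version (version_digits_py version)

-- ===== LEMMAS AND PROOFS =====

-- structural characterisation of splitOn on a single-char separator
def split1 : List Char → List (List Char)
  | [] => [[]]
  | c :: rest => if c = '.' then [] :: split1 rest else (split1 rest).modifyHead (c :: ·)

theorem split1_ne_nil (l : List Char) : split1 l ≠ [] := by
  induction l with
  | nil => simp [split1]
  | cons c rest ih =>
    simp only [split1]
    split_ifs
    · simp
    · cases h : split1 rest with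
      | nil => exact absurd h ih
      | cons a t => simp

theorem ofList_eq_empty_iff (l : List Char) : (String.ofList l = "") ↔ l = [] := by
  rw [show ("" : String) = String.ofList [] from rfl, String.ofList_inj]

theorem splitOn_go_eq (fuel : Nat) : ∀ (l cur : List Char) (acc : List (List Char)),
    l.length < fuel →
    PySem.Chars.splitOn.go ['.'] fuel l cur acc
      = acc.reverse ++ (split1 l).modifyHead (cur.reverse ++ ·) := by
  induction fuel with
  | zero => intro l cur acc h; omega
  | succ f ih =>
    intro l cur acc h
    cases l with
    | nil =>
      simp [PySem.Chars.splitOn.go, split1]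
    | cons c rest =>
      rw [PySem.Chars.splitOn.go]
      by_cases hc : c = '.'
      · subst hc
        rw [if_pos (by simp [List.isPrefixOf])]
        rw [show List.drop (['.'].length) ('.' :: rest) = rest from rfl]
        rw [ih _ _ _ (by simpa using Nat.lt_of_succ_lt_succ h)]
        simp only [split1, if_pos]
        cases split1 rest <;> simp
      · rw [if_neg (by simp [List.isPrefixOf]; exact fun h' => hc h'.symm)]
        rw [ih _ _ _ (by simpa using Nat.lt_of_succ_lt_succ h)]
        simp only [split1, if_neg hc]
        cases hr : split1 rest with
        | nil => exact absurd hr (split1_ne_nil rest)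
        | cons a t => simp

theorem splitOn_eq_split1 (l : List Char) :
    PySem.Chars.splitOn l ['.'] = split1 l := by
  rw [PySem.Chars.splitOn, splitOn_go_eq (l.length + 1) l [] [] (by omega)]
  cases h : split1 l with
  | nil => exact absurd h (split1_ne_nil l)
  | cons a t => simp

-- join of per-part digit chunks = digits of the whole string
theorem flatten_dfilter_split1 (l : List Char) :
    ((split1 l).map (fun p => p.filter PySem.Chars.isdigit)).flatten
      = l.filter PySem.Chars.isdigit := by
  induction l with
  | nil => simp [split1]
  | cons c rest ih =>
    simp only [split1]
    split_ifs with hc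
    · subst hc
      simp [show PySem.Chars.isdigit '.' = false from rfl, ih]
    · cases hr : split1 rest with
      | nil => exact absurd hr (split1_ne_nil rest)
      | cons a t =>
        rw [hr] at ih
        simp only [List.modifyHead, List.map_cons, List.flatten_cons] at *
        by_cases hd : PySem.Chars.isdigit c
        · simp [hd, ih]
        · simp [hd, ih]

theorem flatten_filter_ne_nil {α : Type} (xs : List (List α)) :
    (xs.filter (fun p => p ≠ [])).flatten = xs.flatten := by
  induction xs with
  | nil => rfl
  | cons a t ih =>
    by_cases ha : a = []
    · subst ha
      simp only [List.filter_cons, decide_not]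
      simpa using ih
    · simp only [List.filter_cons]
      rw [if_pos (by simp [ha]), List.flatten_cons, List.flatten_cons, ih]

theorem join_empty_flatten : ∀ (xs : List (List Char)), PySem.Chars.join [] xs = xs.flatten
  | [] => by simp [PySem.Chars.join_nil]
  | [a] => by simp [PySem.Chars.join_singleton]
  | a :: b :: t => by
      rw [PySem.Chars.join_cons_cons, join_empty_flatten (b :: t)]
      simp

theorem filter_ne_empty_map_ofList (xs : List (List Char)) :
    (xs.map String.ofList).filter (fun c => c ≠ "")
      = (xs.filter (fun p => p ≠ [])).map String.ofList := by
  induction xs with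
  | nil => rfl
  | cons a t ih =>
    by_cases ha : a = []
    · subst ha
      simp only [List.map_cons, List.filter_cons]
      rw [if_neg (by simp), if_neg (by simp)]
      exact ih
    · simp only [List.map_cons, List.filter_cons]
      rw [if_pos (by simp [ha]), if_pos (by simp [ha]), List.map_cons, ih]

-- the first component of the scan is the digits of the whole string
theorem scanB_fst (l : List Char) : ∀ a f d,
    (scanB a f d l).1 = a ++ l.filter PySem.Chars.isdigit := by
  induction l with
  | nil => intro a f d; simp [scanB]
  | cons c rest ih =>
    intro a f d
    simp only [scanB]
    by_cases hc : c = '.'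
    · subst hc
      rw [if_pos rfl, ih, List.filter_cons,
        if_neg (by simp [show PySem.Chars.isdigit '.' = false from rfl])]
    · rw [if_neg hc]
      by_cases hd : PySem.Chars.isdigit c
      · rw [if_pos hd, ih, List.filter_cons, if_pos (by simp [hd])]; simp
      · rw [if_neg hd, ih, List.filter_cons, if_neg (by simp [hd])]

-- once first_done is set, first never changes
theorem scanB_snd_done (l : List Char) : ∀ a f, (scanB a f true l).2 = f := by
  induction l with
  | nil => intro a f; simp [scanB]
  | cons c rest ih =>
    intro a f
    simp only [scanB, Bool.true_or]
    split_ifs <;> simp [ih]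

-- digits of the prefix before the first '.'
def uptoDot (l : List Char) : List Char := (l.takeWhile (· ≠ '.')).filter PySem.Chars.isdigit

-- while the first chunk is open and nonempty, the scan extends it with uptoDot
theorem scanB_snd_open (l : List Char) : ∀ a f, f ≠ [] →
    (scanB a f false l).2 = f ++ uptoDot l := by
  induction l with
  | nil => intro a f _; simp [scanB, uptoDot]
  | cons c rest ih =>
    intro a f hf
    simp only [scanB]
    by_cases hc : c = '.'
    · subst hc
      rw [if_pos rfl, show (false || (f ≠ [] : Bool)) = true by simp [hf],
        scanB_snd_done]
      simp [uptoDot]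
    · rw [if_neg hc]
      have hup : uptoDot (c :: rest)
          = (if PySem.Chars.isdigit c then [c] else []) ++ uptoDot rest := by
        simp only [uptoDot, List.takeWhile_cons, if_pos (by simp [hc] : (decide (c ≠ '.')) = true)]
        by_cases hd : PySem.Chars.isdigit c <;> simp [hd, uptoDot]
      by_cases hd : PySem.Chars.isdigit c
      · rw [if_pos hd, ih _ _ (by simp), hup]; simp [hd]
      · rw [if_neg hd, ih _ _ hf, hup]; simp [hd]

-- the first chunk of the input, computed right-recursively
def firstChunk : List Char → List Char
  | [] => []
  | c :: rest =>
    if c = '.' then firstChunk rest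
    else if PySem.Chars.isdigit c then c :: uptoDot rest
    else firstChunk rest

theorem scanB_snd (l : List Char) : ∀ a, (scanB a [] false l).2 = firstChunk l := by
  induction l with
  | nil => intro a; simp [scanB, firstChunk]
  | cons c rest ih =>
    intro a
    simp only [scanB, firstChunk]
    by_cases hc : c = '.'
    · subst hc; rw [if_pos rfl, if_pos rfl, show (false || (([]:List Char) ≠ [] : Bool)) = false by simp, ih]
    · rw [if_neg hc, if_neg hc]
      by_cases hd : PySem.Chars.isdigit c
      · rw [if_pos hd, if_pos hd, scanB_snd_open _ _ _ (by simp)]; simp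
      · rw [if_neg hd, if_neg hd, ih]

-- the head of split1 is the prefix before the first '.'
theorem split1_headD (l : List Char) : (split1 l).headD [] = l.takeWhile (· ≠ '.') := by
  induction l with
  | nil => simp [split1]
  | cons c rest ih =>
    simp only [split1, List.takeWhile_cons]
    by_cases hc : c = '.'
    · subst hc; simp
    · rw [if_neg hc, if_pos (by simp [hc])]
      cases hr : split1 rest with
      | nil => exact absurd hr (split1_ne_nil rest)
      | cons a t => rw [hr] at ih; simp at ih; simp [ih]

-- firstChunk is the head of A's filtered chunk list
theorem firstChunk_eq_headD (l : List Char) :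
    firstChunk l
      = (((split1 l).map (fun p => p.filter PySem.Chars.isdigit)).filter (fun p => p ≠ [])).headD [] := by
  induction l with
  | nil => simp [split1, firstChunk]
  | cons c rest ih =>
    simp only [split1, firstChunk]
    by_cases hc : c = '.'
    · subst hc
      rw [if_pos rfl, if_pos rfl]
      simp only [List.map_cons, List.filter_cons]
      rw [if_neg (by simp)]
      exact ih
    · rw [if_neg hc, if_neg hc]
      cases hr : split1 rest with
      | nil => exact absurd hr (split1_ne_nil rest)
      | cons h t =>
        have hh : h = rest.takeWhile (· ≠ '.') := by
          have := split1_headD rest; rw [hr] at this; simpa using this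
        simp only [List.modifyHead, List.map_cons, List.filter_cons]
        by_cases hd : PySem.Chars.isdigit c
        · rw [if_pos (by simp [hd])]
          simp [hd, hh, uptoDot]
        · rw [hr, List.map_cons, List.filter_cons] at ih
          simp only [if_neg hd]
          exact ih

-- ===== VERDICT (by name: the statement is the Claim_ definition above) =====
theorem version_digits_py_spec : Claim_equal_version_digits_py := by
  intro version _
  unfold Spec_version_digits_py version_digits_py version_digits_py_alt
  rw [splitOn_eq_split1]
  have hmap : ((split1 version.toList).map String.ofList).map
      (fun part => String.ofList (part.toList.filter PySem.Chars.isdigit))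
      = ((split1 version.toList).map (fun p => p.filter PySem.Chars.isdigit)).map String.ofList := by
    simp
  rw [hmap, filter_ne_empty_map_ofList]
  generalize version.toList = l
  simp only [scanB_fst, scanB_snd, List.nil_append]
  set chunks := ((split1 l).map (fun p => p.filter PySem.Chars.isdigit)).filter (fun p => p ≠ []) with hchunks
  have hflat : chunks.flatten = l.filter PySem.Chars.isdigit := by
    rw [hchunks, flatten_filter_ne_nil, flatten_dfilter_split1]
  by_cases hempty : l.filter PySem.Chars.isdigit = []
  · have hallnil : ∀ a ∈ (split1 l).map (fun p => p.filter PySem.Chars.isdigit), a = [] :=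
      List.flatten_eq_nil_iff.mp ((flatten_dfilter_split1 l).trans hempty)
    have h1 : chunks = [] :=
      List.filter_eq_nil_iff.mpr (fun a ha => by simp [hallnil a ha])
    rw [if_pos (by simp [h1]), if_pos hempty]
  · cases h : chunks with
    | nil => exact absurd (by rw [← hflat, h]; rfl) hempty
    | cons a t =>
      have ha : a ≠ [] := by
        have hm : a ∈ chunks := by rw [h]; exact List.mem_cons_self
        rw [hchunks] at hm
        simpa using List.of_mem_filter hm
      have hA : String.ofList a ≠ "" := fun hcon => ha ((ofList_eq_empty_iff a).mp hcon)
      have hfirst : firstChunk l = a := by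
        rw [firstChunk_eq_headD, ← hchunks, h]; rfl
      rw [if_neg (by simp [h]), if_neg hempty]
      have hjoin : PySem.Str.join "" (chunks.map String.ofList)
          = String.ofList (l.filter PySem.Chars.isdigit) := by
        rw [PySem.Str.join]
        have hmaps : (chunks.map String.ofList).map String.toList = chunks := by
          simp [Function.comp_def]
        rw [hmaps, show ("" : String).toList = [] from rfl, join_empty_flatten, hflat]
      rw [h] at hjoin
      rw [hjoin]
      simp only [List.map_cons, List.headD_cons]
      rw [if_pos hA, if_pos (by simp [hfirst, ha] : (firstChunk l ≠ []))]
      rw [hfirst]
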